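-- pv_equiv track=rewrite | github.com/UWPCE-PythonCert-ClassRepos/Self_Paced-Online | students/elmar_m/lesson04/kata14.py | get_stuff_generator
-- ===== SOURCE A (Python) =====
-- def get_stuff_generator(x):
--     '''
--     Generator to iterate over a list of arbitrary length. Get a slice of 3 elements out
--     of the list with every iteration. The slice and it's predecessor overlap by
--     2 elements (the last 2 elements of one slice are the first 2 of the
--     following slice).
--     Return the slice.
--
--         ARGS:
--     x: the list to operate on
--     '''
--     n = 0
--     end = len(x) - 3
--     while n <= end:
--         e = n + 3
--         s = x[n:e]
--         yield s
--         n += 1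
-- ===== SOURCE B (Python) =====
-- def get_stuff_generator(x):
--     '''Yield overlapping length-3 windows of x via the zip-windowing idiom.'''
--     for t in zip(x, x[1:], x[2:]):
--         yield list(t)
-- ===== Notes on version B (the rewrite author's own statement) =====
-- stated objective: idiomatic
-- what changed: Replaced the index-arithmetic while loop with explicit end bound and slicing by the zip-windowing idiom over three offset views (zip(x, x[1:], x[2:])), yielding each triple as a list.
import Mathlib
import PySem

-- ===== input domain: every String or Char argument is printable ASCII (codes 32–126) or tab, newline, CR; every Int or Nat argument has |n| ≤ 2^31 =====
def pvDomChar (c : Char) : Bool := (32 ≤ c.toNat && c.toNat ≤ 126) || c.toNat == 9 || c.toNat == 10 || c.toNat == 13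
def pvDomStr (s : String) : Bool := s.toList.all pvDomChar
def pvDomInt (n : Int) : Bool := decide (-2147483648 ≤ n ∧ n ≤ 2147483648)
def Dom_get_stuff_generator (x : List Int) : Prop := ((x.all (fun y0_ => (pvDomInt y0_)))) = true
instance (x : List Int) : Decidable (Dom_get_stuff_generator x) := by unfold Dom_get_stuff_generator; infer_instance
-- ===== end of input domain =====

-- B replaces A's while loop with explicit end bound and slice arithmetic by the zip-windowing idiom (idiomatic; same cost).

-- ===== PORT A =====
-- A's while loop: n from 0 while n ≤ end, yielding x[n:n+3]
def getStuffLoop (x : List Int) (endv : Int) (n : Int) : List (List Int) :=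
  if h : n ≤ endv then
    PySem.List.slice x (some n) (some (n + 3)) :: getStuffLoop x endv (n + 1)
  else []
termination_by (endv + 1 - n).toNat
decreasing_by omega

def get_stuff_generator (x : List Int) : List (List Int) :=
  getStuffLoop x ((x.length : Int) - 3) 0

-- ===== PORT B =====
-- zip(x, x[1:], x[2:]) then list(t) for each triple
def get_stuff_generator_alt (x : List Int) : List (List Int) :=
  ((x.zip (PySem.List.slice x (some 1) none)).zip (PySem.List.slice x (some 2) none)).map
    (fun t => [t.1.1, t.1.2, t.2])

-- ===== PRECONDITION & SPEC =====
def Spec_get_stuff_generator (x : List Int) (out : List (List Int)) : Prop := out = get_stuff_generator_alt x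
instance (x : List Int) (out : List (List Int)) : Decidable (Spec_get_stuff_generator x out) := by unfold Spec_get_stuff_generator; infer_instance

-- ===== CLAIM (what is proved, stated in full; the proofs are below) =====
def Claim_equal_get_stuff_generator : Prop := ∀ (x : List Int), Dom_get_stuff_generator x → Spec_get_stuff_generator x (get_stuff_generator x)

-- ===== LEMMAS AND PROOFS =====

lemma slice_two (l : List Int) : PySem.List.slice l (some 2) none = l.drop 2 := by
  have := PySem.List.slice_from_natCast l 2
  simpa using this

lemma slice_one (l : List Int) : PySem.List.slice l (some 1) none = l.drop 1 := by
  have := PySem.List.slice_from_natCast l 1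
  simpa using this

lemma alt_short (x : List Int) (h : x.length < 3) : get_stuff_generator_alt x = [] := by
  have hd : x.drop 2 = [] := List.drop_eq_nil_iff.mpr (by omega)
  simp [get_stuff_generator_alt, slice_two, hd]

lemma alt_cons (a b c : Int) (rest : List Int) :
    get_stuff_generator_alt (a :: b :: c :: rest) =
      [a, b, c] :: get_stuff_generator_alt (b :: c :: rest) := by
  simp [get_stuff_generator_alt, slice_two, slice_one]

lemma loop_eq (m : Nat) : ∀ (y : List Int) (n : Nat), n ≤ y.length → y.length - n = m →
    getStuffLoop y ((y.length : Int) - 3) (n : Int) =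
      get_stuff_generator_alt (y.drop n) := by
  induction m with
  | zero =>
      intro y n hn hm
      rw [getStuffLoop, dif_neg (by omega), alt_short]
      simp
      omega
  | succ m ih =>
      intro y n hn hm
      rw [getStuffLoop]
      by_cases h3 : (n : Int) ≤ (y.length : Int) - 3
      · rw [dif_pos h3]
        have hge : 3 ≤ (y.drop n).length := by simp; omega
        obtain ⟨a, b, c, rest, hd⟩ :
            ∃ a b c rest, y.drop n = a :: b :: c :: rest := by
          match hdd : y.drop n, hge with
          | a :: b :: c :: rest, _ => exact ⟨a, b, c, rest, rfl⟩
        have hslice : PySem.List.slice y (some (n : Int)) (some ((n : Int) + 3)) = [a, b, c] := by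
          rw [PySem.List.slice_toNat y (by omega) (by omega)]
          have h1 : ((n : Int) + 3).toNat - ((n : Int)).toNat = 3 := by omega
          have h2 : ((n : Int)).toNat = n := by omega
          rw [h1, h2, hd]
          rfl
        have hdrop1 : y.drop (n + 1) = b :: c :: rest := by
          have hsplit : y.drop (n + 1) = (y.drop n).drop 1 := by
            rw [List.drop_drop]
          rw [hsplit, hd]
          rfl
        have hrec := ih y (n + 1) (by omega) (by omega)
        rw [show ((n : Int) + 1) = ((n + 1 : Nat) : Int) from by push_cast; ring] at *
        rw [hslice, hrec, hdrop1, hd, alt_cons]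
      · rw [dif_neg h3, alt_short]
        simp
        omega

-- ===== VERDICT (by name: the statement is the Claim_ definition above) =====
theorem get_stuff_generator_spec : Claim_equal_get_stuff_generator := by
  intro x _
  unfold Spec_get_stuff_generator get_stuff_generator
  have := loop_eq x.length x 0 (by omega) (by omega)
  simpa using this
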